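-- pv_equiv track=rewrite | github.com/davidemerli/RL-generator-2020-2021 | Generatore_RAM_2020-21.py | solve_batch
-- ===== SOURCE A (Python) =====
-- from math import floor, log2
--
-- def solve_batch(batch):
--     """
--     Given a list with a structure like
--     [cols, rows, PIXEL_1, ..., PIXEL_(ROWS*COLS)]
--     returns a list of pixels equalized with the given algorithm
--     """
--
--     image = batch[2:]
--     min_pixel_value, max_pixel_value = min(image), max(image)
--     delta_value = max_pixel_value - min_pixel_value
--     shift_level = 8 - floor(log2(delta_value + 1))
--
--     def equalize(pixel):
--         temp_pixel = (pixel - min_pixel_value) << shift_level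
--         return min(255, temp_pixel)
--
--     return [equalize(x) for x in image]
-- ===== SOURCE B (Python) =====
-- def solve_batch(batch):
--     """
--     Given a list with a structure like
--     [cols, rows, PIXEL_1, ..., PIXEL_(ROWS*COLS)]
--     returns a list of pixels equalized with the given algorithm.
--     B: no logarithm and no per-pixel shift: subtract the minimum (clamping at 255) once, then
--     repeatedly double the whole list with saturation at 255 while the value
--     span (doubled in lockstep) still fits under 256.  The number of doubling
--     passes equals A's shift level, and saturating doubling s times is the
--     same as min(255, d << s) for d >= 0.
--     """
--     image = batch[2:]
--     lo = min(image)
--     span = max(image) - lo + 1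
--     out = [min(255, v - lo) for v in image]
--     while span < 256:
--         span += span
--         out = [min(255, d + d) for d in out]
--     return out
-- ===== Notes on version B (the rewrite author's own statement) =====
-- stated objective: alternative
-- what changed: B replaces the logarithm-and-per-pixel-shift closed form with iterated whole-list saturating doubling: it subtracts the minimum (clamping at 255) in one pass, then keeps doubling every element with saturation while the value span, doubled in lockstep, is still below 256 - the number of doubling passes equals A's shift level and saturating doubling commutes with the clamp.
import Mathlib
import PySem

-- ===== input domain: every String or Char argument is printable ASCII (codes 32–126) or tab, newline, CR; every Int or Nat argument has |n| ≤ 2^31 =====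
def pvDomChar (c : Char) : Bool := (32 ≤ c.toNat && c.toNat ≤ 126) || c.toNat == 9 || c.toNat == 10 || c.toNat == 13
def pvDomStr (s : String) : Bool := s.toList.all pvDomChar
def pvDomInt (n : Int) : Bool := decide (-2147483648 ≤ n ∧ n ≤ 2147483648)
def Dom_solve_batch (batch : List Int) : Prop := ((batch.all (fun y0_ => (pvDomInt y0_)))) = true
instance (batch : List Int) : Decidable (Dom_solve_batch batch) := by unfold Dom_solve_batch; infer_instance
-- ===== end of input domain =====

-- B avoids the logarithm and the per-pixel shift: it subtracts the minimum (clamping at 255)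
-- in one pass, then repeatedly doubles the whole list with saturation while the value span
-- (doubled in lockstep) still fits under 256 — an alternative algorithm of the same cost.

-- ===== PORT A =====
-- floor(log2(d+1)) of Python ported as Nat.log2 (exact on the integers Pre_ admits, d+1 ≤ 511)
def solve_batch (batch : List Int) : List Int :=
  let image := PySem.List.slice batch (some 2) none
  match PySem.List.min? image (fun x => x), PySem.List.max? image (fun x => x) with
  | some mn, some mx =>
      let delta := mx - mn
      let shift : Int := 8 - (Nat.log2 (delta + 1).toNat : Int)
      -- '<<' with a nonnegative shift: * 2^shift (Pre_ excludes the negative-shift ValueError)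
      image.map (fun pixel => min 255 ((pixel - mn) * 2 ^ shift.toNat))
  | _, _ => []   -- min()/max() raise ValueError on an empty image (excluded by Pre_)

-- ===== PORT B =====
-- one saturating-doubling pass over the list: min(255, d + d) elementwise
def satStep (d : Int) : Int := min 255 (d + d)

-- B's while loop: 'while span < 256: span += span; out = [min(255, d+d) for d in out]'.
-- Fuel 9 only makes the loop total in Lean: whenever the image is nonempty span ≥ 1,
-- so the Python loop runs at most 8 passes and the fuel is never exhausted.
def satLoop : Nat → Int → List Int → List Int
  | 0, _, out => out
  | fuel + 1, span, out =>
      if span < 256 then satLoop fuel (span + span) (out.map satStep)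
      else out

def solve_batch_alt (batch : List Int) : List Int :=
  let image := PySem.List.slice batch (some 2) none
  match PySem.List.min? image (fun x => x) with
  | none => []   -- min() raises ValueError on an empty image (excluded by Pre_)
  | some lo =>
    match PySem.List.max? image (fun x => x) with
    | none => []
    | some mx =>
      satLoop 9 (mx - lo + 1) (image.map (fun v => min 255 (v - lo)))

-- ===== PRECONDITION & SPEC =====
-- Pre_ excludes exactly the inputs where Python A raises: an empty image (min() ValueError,
-- batch shorter than 3) and a value range wider than 510 (negative shift count ValueError).
def Pre_solve_batch (batch : List Int) : Prop :=
  3 ≤ batch.length ∧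
  (PySem.List.max? (batch.drop 2) (fun x => x)).getD 0
    - (PySem.List.min? (batch.drop 2) (fun x => x)).getD 0 ≤ 510
instance (batch : List Int) : Decidable (Pre_solve_batch batch) := by
  unfold Pre_solve_batch; infer_instance

def pvWitness_solve_batch : List Int := [2, 2, 1, 5, 3, 1]

def Spec_solve_batch (batch : List Int) (out : List Int) : Prop := out = solve_batch_alt batch
instance (batch : List Int) (out : List Int) : Decidable (Spec_solve_batch batch out) := by
  unfold Spec_solve_batch; infer_instance

-- ===== CLAIM (what is proved, stated in full; the proofs are below) =====
def Claim_equal_solve_batch : Prop := ∀ (batch : List Int), Dom_solve_batch batch → Pre_solve_batch batch → Spec_solve_batch batch (solve_batch batch)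

-- ===== LEMMAS AND PROOFS =====

-- iterating saturating doubling s times on a clamped nonnegative value is min(255, d·2^s)
theorem iterate_satStep (s : Nat) : ∀ d : Int, 0 ≤ d →
    satStep^[s] (min 255 d) = min 255 (d * 2 ^ s) := by
  induction s with
  | zero => intro d _; simp
  | succ s ih =>
      intro d hd
      rw [Function.iterate_succ_apply]
      have hstep : satStep (min 255 d) = min 255 (d + d) := by
        unfold satStep; omega
      rw [hstep, ih (d + d) (by omega)]
      have : (d + d) * 2 ^ s = d * 2 ^ (s + 1) := by ring
      rw [this]

-- the loop runs exactly s passes when s is the first exponent pushing span·2^s past 255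
theorem satLoop_run : ∀ (s fuel : Nat) (t : Int) (out : List Int), s ≤ fuel →
    (∀ k, k < s → t * 2 ^ k < 256) → 256 ≤ t * 2 ^ s →
    satLoop fuel t out = out.map (satStep^[s]) := by
  intro s
  induction s with
  | zero =>
      intro fuel t out _ _ hge
      have ht : ¬ t < 256 := by simp at hge; omega
      cases fuel with
      | zero => simp [satLoop]
      | succ n => simp [satLoop, ht]
  | succ s ih =>
      intro fuel t out hfuel hlt hge
      have h0 : t < 256 := by have := hlt 0 (by omega); simpa using this
      cases fuel with
      | zero => omega
      | succ n =>
          simp only [satLoop, if_pos h0]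
          rw [ih n (t + t) (out.map satStep) (by omega)
              (fun k hk => by
                have := hlt (k + 1) (by omega)
                calc (t + t) * 2 ^ k = t * 2 ^ (k + 1) := by ring
                  _ < 256 := this)
              (by calc (256 : Int) ≤ t * 2 ^ (s + 1) := hge
                    _ = (t + t) * 2 ^ s := by ring)]
          rw [List.map_map, ← Function.iterate_succ]

-- ===== VERDICT =====
theorem solve_batch_spec : Claim_equal_solve_batch := by
  intro batch _ hpre
  unfold Spec_solve_batch solve_batch solve_batch_alt
  rcases hpre with ⟨hlen, hdelta⟩
  have himg : PySem.List.slice batch (some 2) none = batch.drop 2 := by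
    have := PySem.List.slice_from batch (a := (2 : Int)) (by norm_num)
    simpa using this
  rw [himg]
  set image := batch.drop 2 with himage
  have hne : image ≠ [] := by
    have : 1 ≤ image.length := by rw [himage, List.length_drop]; omega
    intro h; rw [h] at this; simp at this
  obtain ⟨mn, hmn⟩ : ∃ m, PySem.List.min? image (fun x => x) = some m := by
    cases h : PySem.List.min? image (fun x => x) with
    | none => rw [PySem.List.min?_eq_none_iff] at h; exact absurd h hne
    | some m => exact ⟨m, rfl⟩
  obtain ⟨mx, hmx⟩ : ∃ m, PySem.List.max? image (fun x => x) = some m := by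
    cases h : PySem.List.max? image (fun x => x) with
    | none => rw [PySem.List.max?_eq_none_iff] at h; exact absurd h hne
    | some m => exact ⟨m, rfl⟩
  simp only [hmn, hmx]
  have hmnmem : mn ∈ image := PySem.List.min?_mem hmn
  have hmnmin : ∀ y ∈ image, mn ≤ y := fun y hy => PySem.List.min?_isMin hmn y hy
  have hle : mn ≤ mx := PySem.List.max?_isMax hmx mn hmnmem
  have hdel : mx - mn ≤ 510 := by
    rw [himage, hmx, hmn] at hdelta
    simpa using hdelta
  -- the span in Nat and its log2
  set spanN : Nat := (mx - mn + 1).toNat with hspanN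
  have hspan1 : 1 ≤ spanN := by omega
  have hspan511 : spanN ≤ 511 := by omega
  set L : Nat := Nat.log2 spanN with hL
  have hL1 : 2 ^ L ≤ spanN := Nat.log2_self_le (by omega)
  have hL2 : spanN < 2 ^ (L + 1) := Nat.lt_log2_self
  have hL8 : L ≤ 8 := by
    by_contra h
    have : (2 : Nat) ^ 9 ≤ 2 ^ L := Nat.pow_le_pow_right (by norm_num) (by omega)
    simp only [show (2:Nat)^9 = 512 from rfl] at this
    omega
  set s : Nat := 8 - L with hs
  have hshiftNat : ((8 : Int) - (L : Int)).toNat = s := by omega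
  have hspanInt : mx - mn + 1 = (spanN : Int) := by omega
  rw [hshiftNat]
  -- loop bounds, transported to Int
  have hlow : ∀ k, k < s → (spanN : Int) * 2 ^ k < 256 := by
    intro k hk
    have hn : spanN * 2 ^ k < 256 := by
      have h1 : spanN * 2 ^ k < 2 ^ (L + 1) * 2 ^ k :=
        (Nat.mul_lt_mul_right (Nat.two_pow_pos k)).mpr hL2
      have h2 : 2 ^ (L + 1) * 2 ^ k ≤ 2 ^ 8 := by
        rw [← pow_add]; exact Nat.pow_le_pow_right (by norm_num) (by omega)
      calc spanN * 2 ^ k < 2 ^ (L + 1) * 2 ^ k := h1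
        _ ≤ 2 ^ 8 := h2
        _ = 256 := rfl
    exact_mod_cast hn
  have hhigh : (256 : Int) ≤ (spanN : Int) * 2 ^ s := by
    have hn : 256 ≤ spanN * 2 ^ s := by
      have h1 : 2 ^ L * 2 ^ s ≤ spanN * 2 ^ s := Nat.mul_le_mul_right _ hL1
      have h2 : 2 ^ L * 2 ^ s = 2 ^ 8 := by rw [← pow_add]; congr 1; omega
      rw [h2] at h1; simpa using h1
    exact_mod_cast hn
  rw [hspanInt, satLoop_run s 9 (spanN : Int) _ (by omega) hlow hhigh, List.map_map]
  apply List.map_congr_left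
  intro x hx
  have hx0 : (0 : Int) ≤ x - mn := by have := hmnmin x hx; omega
  simp only [Function.comp_apply]
  rw [iterate_satStep s (x - mn) hx0]
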